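-- pv_equiv track=rewrite | github.com/Massa7ca/Projecteuler | 120.py | maxT
-- ===== SOURCE A (Python) =====
-- def formula(a, n):
--     return (pow(a-1, n, a**2) + pow(a+1, n, a**2)) % (a**2)
--
-- def maxT(a):
--     limit = 3000
--     xx = [0, 0]
--     while True:
--         limit += 1
--         t = []
--         for n in range(1, limit):
--             t.append(formula(a, n))
--         xx.append(max(t))
--         if xx[-1] == xx[-2]:
--             return xx[-1]
-- ===== SOURCE B (Python) =====
-- def maxT(a):
--     # (a-1)^n + (a+1)^n mod a^2 is 2 for even n and 2*n*a for odd n, with period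
--     # 2 in n on the evens; A's stabilizing search therefore equals the maximum
--     # over n = 1..3001, scanned here incrementally over the odd n only.
--     sq = a * a
--     best = 2 % sq
--     v = (2 * a) % sq
--     step = (4 * a) % sq
--     for _ in range(1501):
--         if v > best:
--             best = v
--         v = (v + step) % sq
--     return best
-- ===== Notes on version B (the rewrite author's own statement) =====
-- stated objective: faster
-- what changed: Replaces the grow-the-limit stabilization loop full of modular exponentiations by a single incremental pass over the 1501 odd exponents, using the identity (a-1)^n+(a+1)^n = 2 (n even) / 2na (n odd) mod a^2.
import Mathlib
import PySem

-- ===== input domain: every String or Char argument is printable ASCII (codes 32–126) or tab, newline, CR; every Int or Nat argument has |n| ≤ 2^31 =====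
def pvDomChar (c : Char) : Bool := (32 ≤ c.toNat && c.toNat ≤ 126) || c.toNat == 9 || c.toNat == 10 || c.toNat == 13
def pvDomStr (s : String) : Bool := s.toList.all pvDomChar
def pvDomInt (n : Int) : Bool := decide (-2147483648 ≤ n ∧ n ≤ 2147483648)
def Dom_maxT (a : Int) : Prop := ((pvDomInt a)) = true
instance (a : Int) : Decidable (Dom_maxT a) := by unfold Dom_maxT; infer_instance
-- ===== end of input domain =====

-- B replaces A's grow-the-limit stabilization loop of modular exponentiations by one
-- incremental pass over the 1501 odd exponents (faster by a large constant factor; the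
-- equivalence rests on (a-1)^n+(a+1)^n ≡ 2 / 2na (mod a^2) for even / odd n).


-- ===== PORT A =====
-- formula(a, n); the exponent n here is always ≥ 1, so n.toNat is exact
def pvFormula (a n : Int) : Int :=
  PySem.Int.mod (PySem.Int.powMod (a - 1) n.toNat (a ^ 2) + PySem.Int.powMod (a + 1) n.toNat (a ^ 2)) (a ^ 2)

-- mod-m values of the two power sums

-- the 'while True' loop; the fuel argument only makes it total (for a ≠ 0 the loop
-- provably returns within three iterations, so fuel 4 is never exhausted);
-- xx always has ≥ 3 elements and t is nonempty, so the .getD 0 defaults never fire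
def maxTLoop (a : Int) : Nat → Int → List Int → Int
  | 0, _, _ => 0
  | fuel + 1, limit, xx =>
    let limit := limit + 1
    let t := (PySem.List.pyRange 1 limit).foldl (fun acc n => acc ++ [pvFormula a n]) []
    let xx := xx ++ [(PySem.List.max? t (fun x => x)).getD 0]
    if (PySem.List.pyGet? xx (-1)).getD 0 = (PySem.List.pyGet? xx (-2)).getD 0 then
      (PySem.List.pyGet? xx (-1)).getD 0
    else
      maxTLoop a fuel limit xx

def maxT (a : Int) : Int := maxTLoop a 4 3000 [0, 0]

-- ===== PORT B =====
def maxT_alt (a : Int) : Int :=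
  let sq := a * a
  let best := PySem.Int.mod 2 sq
  let v := PySem.Int.mod (2 * a) sq
  let step := PySem.Int.mod (4 * a) sq
  let s := (PySem.List.pyRange 0 1501).foldl
    (fun (s : Int × Int) _ =>
      let best := if s.2 > s.1 then s.2 else s.1
      (best, PySem.Int.mod (s.2 + step) sq))
    (best, v)
  s.1

-- ===== PRECONDITION & SPEC =====
-- Pre_ excludes exactly a = 0, where Python A raises ValueError (pow with modulus 0)
-- and Python B raises ZeroDivisionError
def Pre_maxT (a : Int) : Prop := a ≠ 0
instance (a : Int) : Decidable (Pre_maxT a) := by unfold Pre_maxT; infer_instance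
def pvWitness_maxT : Int := 5

def Spec_maxT (a : Int) (out : Int) : Prop := out = maxT_alt a
instance (a : Int) (out : Int) : Decidable (Spec_maxT a out) := by unfold Spec_maxT; infer_instance

-- ===== CLAIM (what is proved, stated in full; the proofs are below) =====
def Claim_equal_maxT : Prop := ∀ (a : Int), Dom_maxT a → Pre_maxT a → Spec_maxT a (maxT a)

-- ===== LEMMAS AND PROOFS =====

theorem pv_pow_add_modeq (a : Int) (n : Nat) : Int.ModEq (a*a) ((a+1)^n) (1 + n*a) := by
  induction n with
  | zero => simp
  | succ n ih =>
    have h1 : Int.ModEq (a*a) ((a+1)^(n+1)) ((1 + n*a) * (a+1)) := by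
      rw [pow_succ]; exact ih.mul_right _
    refine h1.trans (Int.ModEq.symm (Int.modEq_iff_dvd.mpr ⟨n, by push_cast; ring⟩))

theorem pv_pow_sub_modeq (a : Int) (n : Nat) : Int.ModEq (a*a) ((a-1)^n) ((-1)^n * (1 - n*a)) := by
  induction n with
  | zero => simp
  | succ n ih =>
    have h1 : Int.ModEq (a*a) ((a-1)^(n+1)) ((-1)^n * (1 - n*a) * (a-1)) := by
      rw [pow_succ]; exact ih.mul_right _
    refine h1.trans (Int.ModEq.symm (Int.modEq_iff_dvd.mpr ⟨-((-1)^n * n), by push_cast; ring⟩))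

theorem pv_f_eval (a : Int) (ha : a ≠ 0) (n : Int) :
    pvFormula a n = ((a-1)^n.toNat + (a+1)^n.toNat) % (a*a) := by
  have hm : (0:Int) < a*a := mul_self_pos.mpr ha
  have hsq : (a:Int)^2 = a*a := sq a
  unfold pvFormula
  rw [hsq, PySem.Int.powMod_eq_emod _ _ hm, PySem.Int.powMod_eq_emod _ _ hm,
    PySem.Int.mod_eq_emod_of_pos hm, ← Int.add_emod]

def pvG (a : Int) (j : Nat) : Int := (2*a + 4*a*j) % (a*a)

theorem pv_f_odd (a : Int) (ha : a ≠ 0) (j : Nat) :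
    pvFormula a (2*(j:Int)+1) = pvG a j := by
  rw [pv_f_eval a ha]
  have ht : ((2*(j:Int)+1)).toNat = 2*j+1 := by omega
  rw [ht]
  have h1 := pv_pow_sub_modeq a (2*j+1)
  have h2 := pv_pow_add_modeq a (2*j+1)
  rw [(by exact Odd.neg_one_pow ⟨j, by ring⟩ : ((-1:Int))^(2*j+1) = -1)] at h1
  have h3 : Int.ModEq (a*a) ((a-1)^(2*j+1) + (a+1)^(2*j+1)) (2*a + 4*a*j) := by
    have := h1.add h2
    refine this.trans (Int.ModEq.symm (Int.modEq_iff_dvd.mpr ⟨0, by push_cast; ring⟩))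
  exact h3

theorem pv_f_even (a : Int) (ha : a ≠ 0) (j : Nat) :
    pvFormula a (2*(j:Int)+2) = 2 % (a*a) := by
  rw [pv_f_eval a ha]
  have ht : ((2*(j:Int)+2)).toNat = 2*j+2 := by omega
  rw [ht]
  have h1 := pv_pow_sub_modeq a (2*j+2)
  have h2 := pv_pow_add_modeq a (2*j+2)
  rw [(by exact Even.neg_one_pow ⟨j+1, by ring⟩ : ((-1:Int))^(2*j+2) = 1)] at h1
  have h3 : Int.ModEq (a*a) ((a-1)^(2*j+2) + (a+1)^(2*j+2)) 2 := by
    have := h1.add h2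
    refine this.trans (Int.ModEq.symm (Int.modEq_iff_dvd.mpr ⟨0, by push_cast; ring⟩))
  exact h3

def pvM (a L : Int) : Int :=
  ((PySem.List.pyRange 2 L).map (pvFormula a)).foldl max (pvFormula a 1)

theorem pv_maxt_eq (a L : Int) (hL : 1 < L) :
    ((PySem.List.max? ((PySem.List.pyRange 1 L).map (pvFormula a)) (fun x => x)).getD 0) = pvM a L := by
  rw [PySem.List.pyRange_one_cons hL, List.map_cons, PySem.List.max?_id_cons]
  rfl

theorem pv_m_succ (a L : Int) (h2 : 2 ≤ L) :
    pvM a (L+1) = max (pvM a L) (pvFormula a L) := by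
  rw [pvM, PySem.List.pyRange_one_succ_right h2, List.map_append, List.foldl_append]
  rfl

theorem pv_two_le_m (a : Int) (ha : a ≠ 0) (L : Int) (hL : 2 < L) : 2 % (a*a) ≤ pvM a L := by
  have hmem : (2:Int) ∈ PySem.List.pyRange 2 L := PySem.List.mem_pyRange_one.mpr ⟨le_refl _, hL⟩
  have h2 : pvFormula a 2 = 2 % (a*a) := by
    have := pv_f_even a ha 0; norm_num at this; exact this
  have := (PySem.List.le_foldl_max ((PySem.List.pyRange 2 L).map (pvFormula a)) (pvFormula a 1)).2
    (pvFormula a 2) (List.mem_map_of_mem hmem)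
  rw [h2] at this; exact this

theorem pv_loop_iter (a : Int) (fuel : Nat) (limit : Int) (hl : 1 < limit + 1) (xx : List Int) :
    maxTLoop a (fuel+1) limit xx =
      if pvM a (limit+1) = (PySem.List.pyGet? (xx ++ [pvM a (limit+1)]) (-2)).getD 0
      then pvM a (limit+1)
      else maxTLoop a fuel (limit+1) (xx ++ [pvM a (limit+1)]) := by
  rw [maxTLoop]
  simp only [PySem.List.foldl_append_singleton_eq_map, List.nil_append]
  rw [pv_maxt_eq a (limit+1) hl]
  rw [PySem.List.pyGet?_neg_one, List.getLast?_concat, Option.getD_some]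

theorem pv_maxT_eq (a : Int) (ha : a ≠ 0) : maxT a = pvM a 3002 := by
  have hm21 : pvM a 3002 = max (pvM a 3001) (pvFormula a 3001) := by
    have := pv_m_succ a 3001 (by norm_num); norm_num at this; exact this
  have hm32 : pvM a 3003 = max (pvM a 3002) (pvFormula a 3002) := by
    have := pv_m_succ a 3002 (by norm_num); norm_num at this; exact this
  have hf3002 : pvFormula a 3002 = 2 % (a*a) := by
    have := pv_f_even a ha 1500; norm_num at this; exact this
  have h2le : 2 % (a * a) ≤ pvM a 3001 := pv_two_le_m a ha 3001 (by norm_num)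
  have hm12 : pvM a 3001 ≤ pvM a 3002 := by rw [hm21]; exact le_max_left _ _
  have hm3 : pvM a 3003 = pvM a 3002 := by
    rw [hm32, hf3002]; exact max_eq_left (le_trans h2le hm12)
  have u1 : maxT a = maxTLoop a 4 3000 [0, 0] := rfl
  rw [pv_loop_iter a 3 3000 (by norm_num), (by norm_num : (3000:Int)+1 = 3001)] at u1
  have c1 : (PySem.List.pyGet? ([0, 0] ++ [pvM a 3001]) (-2)).getD 0 = 0 := by
    simp [PySem.List.pyGet?, PySem.List.pyIdx?]
  rw [c1] at u1
  by_cases h0 : pvM a 3001 = 0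
  · rw [if_pos h0] at u1
    have hnn : (0:Int) ≤ 2 % (a*a) := Int.emod_nonneg _ (mul_ne_zero ha ha)
    have hz : 2 % (a*a) = 0 := le_antisymm (h0 ▸ h2le) hnn
    have hdvd : (a*a) ∣ 2 := Int.dvd_of_emod_eq_zero hz
    have hle2 : a*a ≤ 2 := Int.le_of_dvd (by norm_num) hdvd
    have hone : a*a = 1 := by
      rcases Nat.lt_or_ge a.natAbs 2 with h | h
      · have h1 : 1 ≤ a.natAbs := Nat.one_le_iff_ne_zero.mpr (Int.natAbs_ne_zero.mpr ha)
        have h2 : a.natAbs = 1 := by omega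
        have h3 := Int.natAbs_mul_self (a := a)
        rw [h2] at h3; simpa using h3.symm
      · exfalso
        have h4 : (4:Nat) ≤ a.natAbs * a.natAbs := by
          calc (4:Nat) = 2*2 := by norm_num
          _ ≤ a.natAbs * a.natAbs := Nat.mul_le_mul h h
        have h5 := Int.natAbs_mul_self (a := a)
        omega
    have hf3001 : pvFormula a 3001 = 0 := by
      have h6 := pv_f_odd a ha 1500; norm_num at h6
      rw [h6, pvG, hone, Int.emod_one]
    rw [u1, h0, hm21, h0, hf3001]; simp
  · rw [if_neg h0] at u1
    rw [pv_loop_iter a 2 3001 (by norm_num), (by norm_num : (3001:Int)+1 = 3002)] at u1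
    have c2 : (PySem.List.pyGet? (([0, 0] ++ [pvM a 3001]) ++ [pvM a 3002]) (-2)).getD 0 = pvM a 3001 := by
      simp [PySem.List.pyGet?, PySem.List.pyIdx?]
    rw [c2] at u1
    by_cases h1 : pvM a 3002 = pvM a 3001
    · rw [if_pos h1] at u1; exact u1
    · rw [if_neg h1] at u1
      rw [pv_loop_iter a 1 3002 (by norm_num), (by norm_num : (3002:Int)+1 = 3003)] at u1
      have c3 : (PySem.List.pyGet? ((([0, 0] ++ [pvM a 3001]) ++ [pvM a 3002]) ++ [pvM a 3003]) (-2)).getD 0 = pvM a 3002 := by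
        simp [PySem.List.pyGet?, PySem.List.pyIdx?]
      rw [c3] at u1
      rw [if_pos hm3] at u1
      rw [u1, hm3]

def pvRHS (a : Int) (k : Nat) : Int :=
  (List.range k).foldl (fun acc j => max acc (pvG a j)) (2 % (a*a))

theorem pv_B_loop (a : Int) (ha : a ≠ 0) (k : Nat) (b : Int) :
    (List.range k).foldl
      (fun (s : Int × Int) _ =>
        (if s.2 > s.1 then s.2 else s.1, (s.2 + 4*a % (a*a)) % (a*a)))
      (b, pvG a 0)
    = ((List.range k).foldl (fun acc j => max acc (pvG a j)) b, pvG a k) := by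
  have hm : (0:Int) < a*a := mul_self_pos.mpr ha
  induction k with
  | zero => simp
  | succ k ih =>
    rw [List.range_succ, List.foldl_append, List.foldl_append, ih]
    simp only [List.foldl_cons, List.foldl_nil]
    refine congrArg₂ Prod.mk ?_ ?_
    · exact (max_def_lt _ _).symm
    · rw [pvG, pvG, ← Int.add_emod]
      congr 1; push_cast; ring

set_option maxRecDepth 8192 in
theorem pv_B_eq (a : Int) (ha : a ≠ 0) : maxT_alt a = pvRHS a 1501 := by
  have hm : (0:Int) < a*a := mul_self_pos.mpr ha
  have hv : PySem.Int.mod (2*a) (a*a) = pvG a 0 := by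
    rw [PySem.Int.mod_eq_emod_of_pos hm, pvG]; norm_num
  simp only [maxT_alt, PySem.Int.mod_eq_emod_of_pos hm]
  rw [(by norm_num : (1501:Int) = ((1501:Nat):Int)), PySem.List.pyRange_zero_nat, List.foldl_map]
  have hv' : 2 * a % (a*a) = pvG a 0 := by rw [pvG]; norm_num
  rw [hv', pv_B_loop a ha 1501 (2 % (a*a))]
  rfl

theorem pv_rhs_succ (a : Int) (k : Nat) :
    pvRHS a (k+1) = max (pvRHS a k) (pvG a k) := by
  rw [pvRHS, pvRHS, List.range_succ, List.foldl_append]; rfl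

theorem pv_bridge (a : Int) (ha : a ≠ 0) : ∀ j : Nat, 1 ≤ j → pvM a (2*(j:Int)+2) = pvRHS a (j+1) := by
  intro j hj
  induction j with
  | zero => omega
  | succ j ih =>
    rcases Nat.eq_or_lt_of_le hj with h1 | h1
    · -- j+1 = 1, base case: pvM a 4 = pvRHS a 2
      have hj1 : j = 0 := by omega
      subst hj1
      norm_num
      have hr : PySem.List.pyRange 2 4 = [2, 3] := by decide
      have hf1 : pvFormula a 1 = pvG a 0 := by
        have := pv_f_odd a ha 0; norm_num at this; exact this
      have hf2 : pvFormula a 2 = 2 % (a*a) := by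
        have := pv_f_even a ha 0; norm_num at this; exact this
      have hf3 : pvFormula a 3 = pvG a 1 := by
        have := pv_f_odd a ha 1; norm_num at this; exact this
      rw [pvM, hr]
      simp only [List.map_cons, List.map_nil, List.foldl_cons, List.foldl_nil, hf1, hf2, hf3]
      rw [pvRHS, (by decide : List.range 2 = [0, 1])]
      simp only [List.foldl_cons, List.foldl_nil]
      rw [max_comm (pvG a 0) (2 % (a*a))]
    · -- induction step, j ≥ 1
      have hj' : 1 ≤ j := by omega
      have e1 : (2*((j:Int)+1)+2) = (2*(j:Int)+3) + 1 := by ring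
      have e2 : (2*(j:Int)+3) = (2*(j:Int)+2) + 1 := by ring
      have s1 := pv_m_succ a (2*(j:Int)+3) (by omega)
      have s2 := pv_m_succ a (2*(j:Int)+2) (by omega)
      have hfe : pvFormula a (2*(j:Int)+2) = 2 % (a*a) := pv_f_even a ha j
      have hfo : pvFormula a (2*(j:Int)+3) = pvG a (j+1) := by
        have := pv_f_odd a ha (j+1)
        push_cast at this ⊢
        have e3 : (2*((j:Int)+1)+1) = 2*(j:Int)+3 := by ring
        rw [e3] at this; exact this
      push_cast
      rw [e1, s1, hfo, e2, s2, hfe, ih hj']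
      have hle : 2 % (a*a) ≤ pvRHS a (j+1) := by
        rw [pvRHS]; exact (PySem.List.le_foldl_max_int (List.range (j+1)) (pvG a) (2 % (a*a))).1
      rw [max_eq_left hle, pv_rhs_succ a (j+1)]

theorem pv_final (a : Int) (ha : a ≠ 0) : maxT a = maxT_alt a := by
  rw [pv_maxT_eq a ha, pv_B_eq a ha]
  have := pv_bridge a ha 1500 (by norm_num)
  norm_num at this
  exact this

-- ===== VERDICT (by name: the statement is the Claim_ definition above) =====
theorem maxT_spec : Claim_equal_maxT := by
  intro a _ hpre
  unfold Spec_maxT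
  exact pv_final a hpre
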